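-- pv_equiv track=rewrite | github.com/Durgaprasad-kakarla/Geeks-for-Geeks | Difficulty: Medium/Minimum Number of Workers/minimum-number-of-workers.py | minMen
-- ===== SOURCE A (Python) =====
-- def minMen(arr):
--     #code here
--     n = len(arr)
--     coverage = [-1] * n
--     for i, a in enumerate(arr):
--         if a > -1:
--             reach = i + a
--             j = max(0, i - a)
--             if coverage[j] < reach:
--                 coverage[j] = reach
--     count = 0
--     curr_reach = max_reach = -1
--     for i, reach in enumerate(coverage):
--         if reach > max_reach:
--             max_reach = reach
--         if curr_reach < i:
--             if max_reach < i:
--                 return -1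
--             else:
--                 curr_reach = max_reach
--                 count += 1
--     return count
-- ===== SOURCE B (Python) =====
-- def minMen(arr):
--     # Array-free greedy: repeatedly scan arr for the farthest reach among
--     # watchers whose interval starts at or before the next uncovered point.
--     n = len(arr)
--     count = 0
--     t = 0
--     while t < n:
--         best = -1
--         for i, a in enumerate(arr):
--             if a >= 0 and i - a <= t:
--                 r = i + a
--                 if r > best:
--                     best = r
--         if best < t:
--             return -1
--         t = best + 1
--         count += 1
--     return count
-- ===== Notes on version B (the rewrite author's own statement) =====
-- stated objective: alternative
-- what changed: B drops A's coverage array and index-by-index sweep with two accumulators: it greedily jumps from uncovered point to uncovered point, rescanning the raw list for the farthest reach among intervals starting at or before the target.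
import Mathlib
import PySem

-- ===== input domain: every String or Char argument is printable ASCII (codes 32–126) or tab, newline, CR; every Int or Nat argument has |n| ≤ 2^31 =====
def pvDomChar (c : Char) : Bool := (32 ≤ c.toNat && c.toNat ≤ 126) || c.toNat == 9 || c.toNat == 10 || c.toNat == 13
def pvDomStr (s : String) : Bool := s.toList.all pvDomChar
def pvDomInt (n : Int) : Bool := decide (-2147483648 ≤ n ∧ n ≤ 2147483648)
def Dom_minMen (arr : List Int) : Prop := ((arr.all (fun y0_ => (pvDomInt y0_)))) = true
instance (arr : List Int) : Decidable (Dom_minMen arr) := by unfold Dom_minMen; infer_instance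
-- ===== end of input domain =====

-- B replaces A's coverage array and index-by-index sweep by an array-free greedy that
-- jumps from uncovered point to uncovered point, rescanning the list each jump (alternative
-- decomposition, not claimed faster).

-- ===== PORT A =====
-- one fold step of A's first loop (the index j = max(0, i-a) satisfies 0 ≤ j ≤ i < n
-- whenever the branch fires, so Python's coverage[j] never raises; getD/set are exact here)
def covStep (cov : List Int) (p : Int × Int) : List Int :=
  if p.2 > -1 then
    let reach := p.1 + p.2
    let j := (max 0 (p.1 - p.2)).toNat
    if cov.getD j 0 < reach then cov.set j reach else cov
  else cov

def buildCov (arr : List Int) : List Int :=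
  (PySem.List.enumerate arr 0).foldl covStep (List.replicate arr.length (-1))

-- A's second loop; the early `return -1` becomes the -1 result, i is the enumerate index
def sweep : List Int → Nat → Int → Int → Int → Int
  | [], _, count, _, _ => count
  | r :: rest, i, count, curr, maxr =>
    let m := if r > maxr then r else maxr
    if curr < (i : Int) then
      if m < (i : Int) then -1
      else sweep rest (i+1) (count+1) m m
    else sweep rest (i+1) count curr m

def minMen (arr : List Int) : Int :=
  sweep (buildCov arr) 0 0 (-1) (-1)

-- ===== PORT B =====
-- inner scan of Source B: farthest reach i+a over watchers with a ≥ 0 and i-a ≤ t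
def bestStep (t : Int) (b : Int) (p : Int × Int) : Int :=
  if p.2 ≥ 0 ∧ p.1 - p.2 ≤ t then
    let r := p.1 + p.2
    if r > b then r else b
  else b

def bestReach (arr : List Int) (t : Int) : Int :=
  (PySem.List.enumerate arr 0).foldl (bestStep t) (-1)

-- Source B's outer while-loop
def jumps (arr : List Int) (t : Int) (count : Int) : Int :=
  if h1 : t < (arr.length : Int) then
    let b := bestReach arr t
    if h2 : b < t then -1
    else jumps arr (b+1) (count+1)
  else count
termination_by ((arr.length : Int) - t).toNat
decreasing_by omega

def minMen_alt (arr : List Int) : Int :=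
  jumps arr 0 0

-- ===== PRECONDITION & SPEC =====
def Spec_minMen (arr : List Int) (out : Int) : Prop := out = minMen_alt arr
instance (arr : List Int) (out : Int) : Decidable (Spec_minMen arr out) := by unfold Spec_minMen; infer_instance

-- ===== CLAIM (what is proved, stated in full; the proofs are below) =====
def Claim_equal_minMen : Prop := ∀ (arr : List Int), Dom_minMen arr → Spec_minMen arr (minMen arr)

-- ===== LEMMAS AND PROOFS =====

-- running prefix maximum of the coverage array (A's max_reach after T entries)
def pmax (cov : List Int) (T : Nat) : Int := (cov.take T).foldl max (-1)

theorem length_covStep (cov : List Int) (p : Int × Int) :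
    (covStep cov p).length = cov.length := by
  unfold covStep
  split
  · dsimp only
    split <;> simp
  · rfl

theorem length_foldl_covStep (l : List (Int × Int)) (cov : List Int) :
    (l.foldl covStep cov).length = cov.length := by
  induction l generalizing cov with
  | nil => rfl
  | cons p l ih => simp [List.foldl, ih, length_covStep]

theorem length_buildCov (arr : List Int) : (buildCov arr).length = arr.length := by
  simp [buildCov, length_foldl_covStep]

theorem maxfold_acc (l : List Int) (x y : Int) :
    l.foldl max (max x y) = max x (l.foldl max y) := by
  induction l generalizing y with
  | nil => rfl
  | cons a l ih =>
    simp only [List.foldl, max_assoc]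
    exact ih (max y a)

theorem pmax_cons (c : Int) (cs : List Int) (T : Nat) :
    pmax (c :: cs) (T+1) = max c (pmax cs T) := by
  simp only [pmax, List.take_succ_cons, List.foldl]
  rw [max_comm (-1) c, maxfold_acc]

theorem pmax_zero (cov : List Int) : pmax cov 0 = -1 := rfl

theorem pmax_succ (cov : List Int) (i : Nat) (h : i < cov.length) :
    pmax cov (i+1) = max (pmax cov i) (cov.getD i 0) := by
  induction cov generalizing i with
  | nil => simp at h
  | cons c cs ih =>
    cases i with
    | zero => simp [pmax_cons, pmax_zero, max_comm]
    | succ i =>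
      simp only [List.length_cons, Nat.succ_lt_succ_iff] at h
      simp [pmax_cons, ih i h, max_assoc]

theorem getD_le_pmax (cov : List Int) (j T : Nat) (hj : j < T) (hlen : j < cov.length) :
    cov.getD j 0 ≤ pmax cov T := by
  induction cov generalizing j T with
  | nil => simp at hlen
  | cons c cs ih =>
    cases T with
    | zero => omega
    | succ T =>
      cases j with
      | zero => simp [pmax_cons]
      | succ j =>
        simp only [List.length_cons, Nat.succ_lt_succ_iff] at hlen
        have := ih j T (by omega) hlen
        simp only [List.getD_cons_succ, pmax_cons]
        exact le_trans this (le_max_right _ _)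

theorem pmax_set_lt (cov : List Int) (j T : Nat) (v : Int)
    (hj : j < T) (hlen : j < cov.length) (hv : cov.getD j 0 ≤ v) :
    pmax (cov.set j v) T = max (pmax cov T) v := by
  induction cov generalizing j T with
  | nil => simp at hlen
  | cons c cs ih =>
    cases T with
    | zero => omega
    | succ T =>
      cases j with
      | zero =>
        simp only [List.getD_cons_zero] at hv
        simp only [List.set_cons_zero, pmax_cons]
        omega
      | succ j =>
        simp only [List.length_cons, Nat.succ_lt_succ_iff] at hlen
        simp only [List.getD_cons_succ] at hv
        simp only [List.set_cons_succ, pmax_cons, ih j T (by omega) hlen hv, max_assoc]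

theorem pmax_set_ge (cov : List Int) (j T : Nat) (v : Int) (hj : T ≤ j) :
    pmax (cov.set j v) T = pmax cov T := by
  induction cov generalizing j T with
  | nil => simp
  | cons c cs ih =>
    cases T with
    | zero => simp [pmax_zero]
    | succ T =>
      cases j with
      | zero => omega
      | succ j => simp only [List.set_cons_succ, pmax_cons, ih j T (by omega)]

theorem bestStep_max (t b : Int) (p : Int × Int) :
    bestStep t b p = if p.2 ≥ 0 ∧ p.1 - p.2 ≤ t then max b (p.1 + p.2) else b := by
  unfold bestStep
  split <;> [skip; rfl]
  simp only [max_def]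
  split <;> split <;> omega

-- one fold step: updating the coverage array then taking the prefix max below t+1
-- is the same as folding the candidate reach into the best-so-far
theorem step_eq (cov : List Int) (p : Int × Int) (t : Int) (ht : 0 ≤ t)
    (hp1 : 0 ≤ p.1) (hp2 : p.1 < (cov.length : Int)) :
    pmax (covStep cov p) (t.toNat + 1) = bestStep t (pmax cov (t.toNat + 1)) p := by
  rw [bestStep_max]
  unfold covStep
  by_cases ha : p.2 > -1
  · simp only [ha, if_true]
    have ha' : p.2 ≥ 0 := by omega
    set j := (max 0 (p.1 - p.2)).toNat with hjdef
    have hjlen : j < cov.length := by omega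
    by_cases hle : p.1 - p.2 ≤ t
    · have hjT : j < t.toNat + 1 := by omega
      simp only [ha', hle, and_self, if_true]
      by_cases hcd : cov.getD j 0 < p.1 + p.2
      · simp only [hcd, if_true]
        exact pmax_set_lt cov j _ _ hjT hjlen (by omega)
      · simp only [hcd, if_false]
        have h1 := getD_le_pmax cov j (t.toNat + 1) hjT hjlen
        omega
    · have hjT : t.toNat + 1 ≤ j := by omega
      simp only [hle, and_false, if_false]
      split
      · exact pmax_set_ge cov j _ _ hjT
      · rfl
  · have : ¬ (p.2 ≥ 0 ∧ p.1 - p.2 ≤ t) := by omega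
    simp only [ha, if_false, this]

theorem fold_eq (l : List (Int × Int)) (cov : List Int) (t : Int) (ht : 0 ≤ t)
    (hl : ∀ p ∈ l, 0 ≤ p.1 ∧ p.1 < (cov.length : Int)) :
    pmax (l.foldl covStep cov) (t.toNat + 1) = l.foldl (bestStep t) (pmax cov (t.toNat + 1)) := by
  induction l generalizing cov with
  | nil => rfl
  | cons p l ih =>
    simp only [List.foldl]
    rw [ih (covStep cov p)
        (by intro q hq; rw [length_covStep]; exact hl q (List.mem_cons_of_mem _ hq)),
      step_eq cov p t ht (hl p (List.mem_cons_self)).1 (hl p (List.mem_cons_self)).2]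

theorem pmax_replicate (n T : Nat) : pmax (List.replicate n (-1)) T = -1 := by
  induction n generalizing T with
  | zero => simp [pmax]
  | succ n ih =>
    cases T with
    | zero => rfl
    | succ T => simp only [List.replicate_succ, pmax_cons, ih T, max_self]

theorem best_eq (arr : List Int) (i : Nat) :
    bestReach arr (i : Int) = pmax (buildCov arr) (i + 1) := by
  have hmem : ∀ p ∈ PySem.List.enumerate arr 0, 0 ≤ p.1 ∧ p.1 < ((List.replicate arr.length (-1 : Int)).length : Int) := by
    intro p hp
    rw [PySem.List.mem_enumerate_iff] at hp
    obtain ⟨k, hk, rfl⟩ := hp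
    simp; omega
  have := fold_eq (PySem.List.enumerate arr 0) (List.replicate arr.length (-1)) (i : Int)
    (by positivity) hmem
  simp only [Int.toNat_natCast] at this
  unfold bestReach buildCov
  rw [this, pmax_replicate]

-- main invariant: A's sweep from position i (with running max = pmax cov i and
-- curr ≥ i-1) computes exactly B's jump loop with next target curr+1
theorem sweep_eq (arr : List Int) (d : List Int) (i : Nat) (curr count : Int)
    (hd : d = (buildCov arr).drop i) (hinv : (i : Int) ≤ curr + 1) :
    sweep d i count curr (pmax (buildCov arr) i) = jumps arr (curr + 1) count := by
  induction d generalizing i curr count with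
  | nil =>
    have hlen : arr.length ≤ i := by
      have := congrArg List.length hd
      simp [length_buildCov] at this
      omega
    rw [sweep, jumps, dif_neg (show ¬ (curr + 1 < (arr.length : Int)) by omega)]
  | cons r rest ih =>
    have hi : i < (buildCov arr).length := by
      by_contra hcon
      rw [List.drop_eq_nil_of_le (by omega)] at hd
      exact List.cons_ne_nil r rest hd
    have hi' : i < arr.length := by rwa [length_buildCov] at hi
    rw [List.drop_eq_getElem_cons hi] at hd
    injection hd with hr hrest
    have hm : (if r > pmax (buildCov arr) i then r else pmax (buildCov arr) i)
        = pmax (buildCov arr) (i+1) := by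
      rw [pmax_succ _ i hi, hr, max_def, List.getD_eq_getElem _ _ hi]
      split <;> split <;> omega
    rw [sweep]
    simp only [hm]
    by_cases hc : curr < (i : Int)
    · have hcurr : curr + 1 = (i : Int) := by omega
      rw [if_pos hc, hcurr, jumps]
      rw [dif_pos (show ((i : Int) < (arr.length : Int)) by omega)]
      dsimp only
      simp only [best_eq arr i]
      by_cases hb : pmax (buildCov arr) (i+1) < (i : Int)
      · rw [if_pos hb, dif_pos hb]
      · rw [if_neg hb, dif_neg hb,
          ih (i+1) (pmax (buildCov arr) (i+1)) (count+1) hrest (by omega)]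
    · rw [if_neg hc,
        ih (i+1) curr count hrest (by omega)]

-- ===== VERDICT (by name: the statement is the Claim_ definition above) =====
theorem minMen_spec : Claim_equal_minMen := by
  intro arr _
  unfold Spec_minMen minMen minMen_alt
  have := sweep_eq arr (buildCov arr) 0 (-1) 0 (by simp) (by omega)
  simpa [pmax_zero] using this
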